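-- pv_equiv track=rewrite | github.com/azimb/coding-questions-practice | coding-questions-python/merge-k-sorted-lists.py | merge_first_two
-- ===== SOURCE A (Python) =====
-- def merge_first_two(sorted_lists):
--     updated = []
--     for i in range(0, len(sorted_lists), 2):
--         #odd length
--         if i == len(sorted_lists) - 1:
--             result = sorted_lists[i]
--         #even lengths
--         else:
--             result = merge(sorted_lists[i], sorted_lists[i+1])
--         updated.append(result)
--     return updated
--
-- def merge(list_one, list_two):
--     result = []
--     u = v = 0
--     while u < len(list_one) and v < len(list_two):
--         if list_one[u] <= list_two[v]:
--             result.append(list_one[u])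
--             u += 1
--         else:
--             result.append(list_two[v])
--             v += 1
--
--     for i in range(v, len(list_two)):
--         result.append(list_two[i])
--
--     for i in range(u, len(list_one)):
--         result.append(list_one[i])
--
--     return result
-- ===== SOURCE B (Python) =====
-- def merge_first_two(sorted_lists):
--     if not sorted_lists:
--         return []
--     if len(sorted_lists) == 1:
--         return [sorted_lists[0]]
--     return [merge2(sorted_lists[0], sorted_lists[1])] + merge_first_two(sorted_lists[2:])
--
--
-- def merge2(a, b):
--     if not a:
--         return list(b)
--     if not b:
--         return list(a)
--     if a[0] <= b[0]:
--         return [a[0]] + merge2(a[1:], b)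
--     return [b[0]] + merge2(a, b[1:])
-- ===== Notes on version B (the rewrite author's own statement) =====
-- stated objective: alternative
-- what changed: A's index-driven loops (a range-step-2 pairing loop, a two-counter while merge, and two flush for-loops) are replaced by pure structural recursion: merge_first_two recurses two lists at a time on the list structure and merge2 recurses on the heads, consing the result front-to-back with no indices, counters or appends.
import Mathlib
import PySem

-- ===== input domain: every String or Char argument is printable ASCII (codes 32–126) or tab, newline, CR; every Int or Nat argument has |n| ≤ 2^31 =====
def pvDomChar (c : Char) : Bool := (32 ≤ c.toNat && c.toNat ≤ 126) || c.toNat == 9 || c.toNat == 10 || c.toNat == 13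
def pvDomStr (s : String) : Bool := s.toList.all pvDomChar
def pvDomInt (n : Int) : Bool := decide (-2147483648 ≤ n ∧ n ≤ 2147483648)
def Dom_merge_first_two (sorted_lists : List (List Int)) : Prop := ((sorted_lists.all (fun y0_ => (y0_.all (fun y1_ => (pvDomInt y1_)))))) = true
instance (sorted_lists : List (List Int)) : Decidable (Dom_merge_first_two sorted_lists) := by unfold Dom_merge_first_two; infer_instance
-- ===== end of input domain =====

-- B replaces A's index-driven loops (range-step-2 pairing, two-counter while merge, flush for-loops)
-- by pure structural recursion on the lists (objective: alternative decomposition, same cost).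

-- ===== PORT A =====
-- the while-loop of `merge`: state (u, v, result); the two trailing for-loops append list_two[v:] then list_one[u:]
def pvMergeLoop (list_one list_two : List Int) (u v : Nat) (result : List Int) : List Int :=
  if h : u < list_one.length ∧ v < list_two.length then
    if list_one[u]'h.1 ≤ list_two[v]'h.2 then
      pvMergeLoop list_one list_two (u + 1) v (result ++ [list_one[u]'h.1])
    else
      pvMergeLoop list_one list_two u (v + 1) (result ++ [list_two[v]'h.2])
  else
    -- for i in range(v, len(list_two)): result.append(list_two[i]); then the same for list_one from u
    (PySem.List.pyRange (u : Int) (list_one.length : Int) 1).foldl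
      (fun acc i => acc ++ [PySem.List.pyGetD list_one i 0])
      ((PySem.List.pyRange (v : Int) (list_two.length : Int) 1).foldl
        (fun acc i => acc ++ [PySem.List.pyGetD list_two i 0]) result)
termination_by (list_one.length - u) + (list_two.length - v)
decreasing_by all_goals omega

def pvMerge (list_one list_two : List Int) : List Int :=
  pvMergeLoop list_one list_two 0 0 []

def merge_first_two (sorted_lists : List (List Int)) : List (List Int) :=
  (PySem.List.pyRange 0 (sorted_lists.length : Int) 2).foldl
    (fun updated i =>
      let result :=
        if i = (sorted_lists.length : Int) - 1 then
          PySem.List.pyGetD sorted_lists i []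
        else
          pvMerge (PySem.List.pyGetD sorted_lists i []) (PySem.List.pyGetD sorted_lists (i + 1) [])
      updated ++ [result]) []

-- ===== PORT B =====
-- merge2: head-directed structural recursion, consing the smaller head onto the merged tails
def pvMerge2 : List Int → List Int → List Int
  | [], b => b
  | a :: as, [] => a :: as
  | a :: as, b :: bs =>
      if a ≤ b then a :: pvMerge2 as (b :: bs) else b :: pvMerge2 (a :: as) bs

-- merge_first_two: recursion two lists at a time on the list structure (sorted_lists[2:])
def merge_first_two_alt : List (List Int) → List (List Int)
  | [] => []
  | [x] => [x]
  | a :: b :: rest => pvMerge2 a b :: merge_first_two_alt rest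

-- ===== PRECONDITION & SPEC =====
def Spec_merge_first_two (sorted_lists : List (List Int)) (out : List (List Int)) : Prop := out = merge_first_two_alt sorted_lists
instance (sorted_lists : List (List Int)) (out : List (List Int)) : Decidable (Spec_merge_first_two sorted_lists out) := by unfold Spec_merge_first_two; infer_instance

-- ===== CLAIM (what is proved, stated in full; the proofs are below) =====
def Claim_equal_merge_first_two : Prop := ∀ (sorted_lists : List (List Int)), Dom_merge_first_two sorted_lists → Spec_merge_first_two sorted_lists (merge_first_two sorted_lists)

-- ===== LEMMAS AND PROOFS =====

theorem pvMerge2_eq (a b : List Int) :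
    pvMerge2 a b = a.merge b (fun x y => decide (x ≤ y)) := by
  fun_induction pvMerge2 a b with
  | case1 b => simp [List.nil_merge]
  | case2 a as => simp [List.merge_right]
  | case3 a as b bs hle ih => rw [List.cons_merge_cons, if_pos (by simpa using hle)]; simp [ih]
  | case4 a as b bs hle ih => rw [List.cons_merge_cons, if_neg (by simpa using hle)]; simp [ih]

theorem pvMergeLoop_eq (list_one list_two : List Int) (u v : Nat) (result : List Int) :
    pvMergeLoop list_one list_two u v result
      = result ++ (list_one.drop u).merge (list_two.drop v) (fun x y => decide (x ≤ y)) := by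
  fun_induction pvMergeLoop list_one list_two u v result with
  | case1 u v res h hle ih =>
      rw [ih, List.drop_eq_getElem_cons h.1, List.drop_eq_getElem_cons h.2,
        List.cons_merge_cons, if_pos (by simpa using hle), ← List.drop_eq_getElem_cons h.2]
      simp
  | case2 u v res h hle ih =>
      rw [ih, List.drop_eq_getElem_cons h.1, List.drop_eq_getElem_cons h.2,
        List.cons_merge_cons, if_neg (by simpa using hle), ← List.drop_eq_getElem_cons h.1]
      simp
  | case3 u v res h =>
      rw [PySem.List.foldl_pyRange_pyGetD' list_two 0 (fun acc x => acc ++ [x]) res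
          (Int.natCast_nonneg v),
        PySem.List.foldl_pyRange_pyGetD' list_one 0 (fun acc x => acc ++ [x]) _
          (Int.natCast_nonneg u)]
      simp only [Int.toNat_natCast, PySem.List.foldl_append_singleton]
      rcases not_and_or.mp h with hu | hv
      · rw [List.drop_eq_nil_of_le (by omega : list_one.length ≤ u), List.nil_merge]
        simp
      · rw [List.drop_eq_nil_of_le (by omega : list_two.length ≤ v), List.merge_right]
        simp

theorem pvMerge_eq (a b : List Int) : pvMerge a b = a.merge b (fun x y => decide (x ≤ y)) := by
  simp [pvMerge, pvMergeLoop_eq]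

-- the loop body of A, as a function of the index
def pvF (ls : List (List Int)) (i : Int) : List Int :=
  if i = (ls.length : Int) - 1 then
    PySem.List.pyGetD ls i []
  else
    pvMerge (PySem.List.pyGetD ls i []) (PySem.List.pyGetD ls (i + 1) [])

theorem merge_first_two_eq_map (ls : List (List Int)) :
    merge_first_two ls
      = (List.range ((ls.length + 1) / 2)).map (fun k : Nat => pvF ls (2 * (k : Int))) := by
  have h0 : merge_first_two ls
      = (PySem.List.pyRange 0 (ls.length : Int) 2).foldl (fun acc i => acc ++ [pvF ls i]) [] := rfl
  rw [h0, PySem.List.foldl_append_singleton_eq_map, List.nil_append,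
    PySem.List.pyRange_of_pos 0 (ls.length : Int) (by norm_num), List.map_map]
  have hcount : (if (0:Int) < (ls.length : Int) then
      (((ls.length : Int) - 0 + 2 - 1) / 2).toNat else 0) = (ls.length + 1) / 2 := by
    split <;> omega
  rw [hcount]
  refine List.map_congr_left fun k _ => ?_
  simp

theorem pvGetD_cons2 (x y : List Int) (xs : List (List Int)) (n : Nat) (d : List Int) :
    PySem.List.pyGetD (x :: y :: xs) ((n : Int) + 2) d = PySem.List.pyGetD xs (n : Int) d := by
  rw [show ((n : Int) + 2) = (((n + 2 : Nat)) : Int) by push_cast; ring,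
    PySem.List.pyGetD_natCast, PySem.List.pyGetD_natCast]
  rfl

theorem pvF_shift' (a b : List Int) (rest : List (List Int)) (j : Nat) :
    pvF (a :: b :: rest) ((j : Int) + 2) = pvF rest (j : Int) := by
  unfold pvF
  by_cases hc : (j : Int) = (rest.length : Int) - 1
  · rw [if_pos (by simp only [List.length_cons]; push_cast; omega), if_pos hc, pvGetD_cons2]
  · rw [if_neg (by simp only [List.length_cons]; push_cast; omega), if_neg hc, pvGetD_cons2,
      show (j : Int) + 2 + 1 = ((j + 1 : Nat) : Int) + 2 by push_cast; ring, pvGetD_cons2,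
      Nat.cast_add, Nat.cast_one]

theorem pvF_shift (a b : List Int) (rest : List (List Int)) (k : Nat) :
    pvF (a :: b :: rest) (2 * ((k + 1 : Nat) : Int)) = pvF rest (2 * (k : Int)) := by
  rw [show 2 * (((k + 1 : Nat)) : Int) = ((2 * k : Nat) : Int) + 2 by push_cast; ring, pvF_shift',
    show ((2 * k : Nat) : Int) = 2 * ((k : Nat) : Int) by push_cast; ring]

theorem pv_alt_eq (ls : List (List Int)) :
    (List.range ((ls.length + 1) / 2)).map (fun k : Nat => pvF ls (2 * (k : Int)))
      = merge_first_two_alt ls := by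
  induction ls using merge_first_two_alt.induct with
  | case1 => rfl
  | case2 a =>
      have h5 : PySem.List.pyGetD [a] 0 [] = a := PySem.List.pyGetD_zero_cons a [] []
      simp [pvF, merge_first_two_alt, h5]
  | case3 a b rest ih =>
      have hn : ((a :: b :: rest).length + 1) / 2 = (rest.length + 1) / 2 + 1 := by
        simp only [List.length_cons]; omega
      rw [hn, List.range_succ_eq_map, List.map_cons, List.map_map]
      have hhead : pvF (a :: b :: rest) (2 * ((0 : Nat) : Int))
          = a.merge b (fun x y => decide (x ≤ y)) := by
        have hb : PySem.List.pyGetD (a :: b :: rest) (0 + 1) [] = b := by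
          rw [show ((0 : Int) + 1) = ((1 : Nat) : Int) by norm_num, PySem.List.pyGetD_natCast]
          rfl
        unfold pvF
        rw [if_neg (by simp only [List.length_cons]; push_cast; omega)]
        simp only [Nat.cast_zero, mul_zero] at hb ⊢
        rw [hb, PySem.List.pyGetD_zero_cons, pvMerge_eq]
      have htail : (List.range ((rest.length + 1) / 2)).map
            ((fun k : Nat => pvF (a :: b :: rest) (2 * (k : Int))) ∘ Nat.succ)
          = (List.range ((rest.length + 1) / 2)).map (fun k : Nat => pvF rest (2 * (k : Int))) := by
        refine List.map_congr_left fun k _ => ?_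
        simpa using pvF_shift a b rest k
      rw [hhead, htail, ih, merge_first_two_alt, ← pvMerge2_eq]

-- ===== VERDICT (by name: the statement is the Claim_ definition above) =====
theorem merge_first_two_spec : Claim_equal_merge_first_two := by
  intro ls _
  unfold Spec_merge_first_two
  rw [merge_first_two_eq_map, pv_alt_eq]
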